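-- pv_equiv track=rewrite | github.com/sion9262/TIL | algorithm/자료구조(스택큐해쉬힙)/교육과정설계.py | solve
-- ===== SOURCE A (Python) =====
-- def solve(find, n, study):
--
--     answer = "YES"
--     find = list(find)
--     for i in range(len(study)):
--         if study[i] in find:
--             if study[i] == find[0]:
--                 find.pop(0)
--             else:
--                 answer ="NO"
--                 break
--
--     if len(find) > 0:
--         answer = "NO"
--
--     return answer
-- ===== SOURCE B (Python) =====
-- def solve(find, n, study):
--     remaining = {}
--     for c in find:
--         remaining[c] = remaining.get(c, 0) + 1
--     ptr = 0
--     for c in study: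
--         if ptr < len(find) and c == find[ptr]:
--             remaining[c] = remaining[c] - 1
--             ptr += 1
--         elif remaining.get(c, 0) > 0:
--             return "NO"
--     return "YES" if ptr == len(find) else "NO"
-- ===== Notes on version B (the rewrite author's own statement) =====
-- stated objective: alternative
-- what changed: A repeatedly scans and pops the front of a mutable copy of find; B never mutates or copies find: it precomputes a dict multiset counter of find and walks study with an index pointer, doing O(1) dict lookups instead of list scans (better worst case, but A's early break makes it faster on typical random inputs).
import Mathlib
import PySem

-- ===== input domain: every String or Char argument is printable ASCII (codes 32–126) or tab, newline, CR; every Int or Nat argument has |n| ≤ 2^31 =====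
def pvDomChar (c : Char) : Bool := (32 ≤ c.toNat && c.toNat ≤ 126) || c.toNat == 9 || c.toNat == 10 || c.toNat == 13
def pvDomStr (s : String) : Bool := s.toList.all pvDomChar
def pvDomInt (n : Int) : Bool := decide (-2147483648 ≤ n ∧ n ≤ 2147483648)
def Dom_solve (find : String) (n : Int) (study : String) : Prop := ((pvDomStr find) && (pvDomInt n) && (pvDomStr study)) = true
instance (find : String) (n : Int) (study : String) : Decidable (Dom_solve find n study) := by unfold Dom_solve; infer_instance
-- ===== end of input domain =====

-- B replaces A's scan-and-pop of a mutable list copy by a precomputed multiset counter of find plus an index pointer (alternative algorithm; no speed claim).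

-- ===== PORT A =====
-- A's loop over study: state is the mutable list `find`; `none` models the `break` with answer = "NO".
-- `find[0]` / `find.pop(0)` are only reached under `contains`, so the list is nonempty there and
-- `headD ' '` / `tail` are exact.
def solveLoopA : List Char → List Char → Option (List Char)
  | [], f => some f
  | c :: rest, f =>
    if f.contains c then
      if c == f.headD ' ' then solveLoopA rest f.tail else none
    else solveLoopA rest f

def solve (find : String) (n : Int) (study : String) : String :=
  match solveLoopA study.toList find.toList with
  | none => "NO"
  | some f => if f.length > 0 then "NO" else "YES"

-- ===== PORT B =====
-- B's loop over study: state is the counter dict `remaining` and the pointer `ptr`; `none` models `return "NO"`.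
def solveLoopB : List Char → List Char → PySem.Dict Char Int → Nat → Option Nat
  | [], _, _, ptr => some ptr
  | c :: rest, f, d, ptr =>
    if ptr < f.length ∧ c = f.getD ptr ' ' then
      solveLoopB rest f (d.insert c (d.getD c 0 - 1)) (ptr + 1)
    else if d.getD c 0 > 0 then none
    else solveLoopB rest f d ptr

def solve_alt (find : String) (n : Int) (study : String) : String :=
  match solveLoopB study.toList find.toList
      (find.toList.foldl (fun d c => d.insert c (d.getD c 0 + 1)) PySem.Dict.empty) 0 with
  | none => "NO"
  | some ptr => if ptr = find.toList.length then "YES" else "NO"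

-- ===== PRECONDITION & SPEC =====
def Spec_solve (find : String) (n : Int) (study : String) (out : String) : Prop := out = solve_alt find n study
instance (find : String) (n : Int) (study : String) (out : String) : Decidable (Spec_solve find n study out) := by unfold Spec_solve; infer_instance

-- ===== CLAIM (what is proved, stated in full; the proofs are below) =====
def Claim_equal_solve : Prop := ∀ (find : String) (n : Int) (study : String), Dom_solve find n study → Spec_solve find n study (solve find n study)

-- ===== LEMMAS AND PROOFS =====

-- Invariant: B's state (d, ptr) represents A's state f.drop ptr: d counts exactly the multiset f.drop ptr.
theorem solveLoopB_eq (s : List Char) (f : List Char) (d : PySem.Dict Char Int) (ptr : Nat)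
    (hle : ptr ≤ f.length)
    (hd : ∀ c, d.getD c 0 = ((f.drop ptr).count c : Int)) :
    solveLoopB s f d ptr = (solveLoopA s (f.drop ptr)).map (fun r => f.length - r.length) := by
  induction s generalizing d ptr with
  | nil =>
    simp [solveLoopA, solveLoopB]
    omega
  | cons c rest ih =>
    simp only [solveLoopA, solveLoopB]
    by_cases hmain : ptr < f.length ∧ c = f.getD ptr ' '
    · obtain ⟨hlt, hc⟩ := hmain
      have hdrop : f.drop ptr = c :: f.drop (ptr + 1) := by
        rw [List.drop_eq_getElem_cons hlt]
        congr 1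
        rw [hc]; exact (List.getD_eq_getElem f ' ' hlt).symm
      rw [if_pos ⟨hlt, hc⟩]
      have hcount : ∀ x, (PySem.Dict.insert d c (d.getD c 0 - 1)).getD x 0 =
          ((f.drop (ptr + 1)).count x : Int) := by
        intro x
        rw [PySem.Dict.getD_insert]
        by_cases hx : x = c
        · subst hx
          rw [if_pos rfl, hd]
          have : (f.drop ptr).count x = (f.drop (ptr+1)).count x + 1 := by
            rw [hdrop]; simp
          rw [this]; push_cast; ring
        · have hx' : ¬ c = x := fun h => hx h.symm
          rw [if_neg hx, hd]
          rw [hdrop]; simp [hx']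
      rw [ih (PySem.Dict.insert d c (d.getD c 0 - 1)) (ptr + 1) hlt hcount, hdrop]
      simp [List.headD, List.tail]
    · rw [if_neg hmain]
      by_cases hpos : d.getD c 0 > 0
      · rw [if_pos hpos]
        have hcnt : 0 < (f.drop ptr).count c := by
          have := hd c; rw [this] at hpos; exact_mod_cast hpos
        have hmem : (f.drop ptr).contains c := by
          simp only [List.contains_eq_mem, decide_eq_true_eq]
          exact List.count_pos_iff.mp hcnt
        have hne : f.drop ptr ≠ [] := by
          intro h0; rw [h0] at hcnt; simp at hcnt
        have hlt : ptr < f.length := by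
          by_contra hge
          exact hne (List.drop_eq_nil_of_le (by omega))
        have hhead : f.drop ptr = f[ptr] :: f.drop (ptr + 1) := List.drop_eq_getElem_cons hlt
        have hhc : (c == (f.drop ptr).headD ' ') = false := by
          rw [hhead]
          simp only [List.headD, beq_eq_false_iff_ne, ne_eq]
          intro hcq
          exact hmain ⟨hlt, by rw [hcq]; exact (List.getD_eq_getElem f ' ' hlt).symm⟩
        rw [if_pos hmem, hhc]
        simp
      · rw [if_neg hpos]
        have hnmem : ¬ (f.drop ptr).contains c := by
          have := hd c
          intro hmem
          simp only [List.contains_eq_mem, decide_eq_true_eq] at hmem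
          have h1 : 0 < (f.drop ptr).count c := List.count_pos_iff.mpr hmem
          have : (0:Int) < ((f.drop ptr).count c : Int) := by exact_mod_cast h1
          omega
        rw [if_neg hnmem]
        exact ih d ptr hle hd

-- The result of A's loop is no longer than the list it starts from.
theorem solveLoopA_length_le : ∀ (s f r : List Char), solveLoopA s f = some r → r.length ≤ f.length := by
  intro s
  induction s with
  | nil =>
    intro f r h
    simp only [solveLoopA, Option.some.injEq] at h
    simp [h]
  | cons c rest ih =>
    intro f r h
    simp only [solveLoopA] at h
    by_cases hc : f.contains c
    · rw [if_pos hc] at h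
      by_cases he : (c == f.headD ' ') = true
      · rw [if_pos he] at h
        have h1 := ih f.tail r h
        have h2 : f.tail.length ≤ f.length := by
          cases f <;> simp
        omega
      · rw [if_neg he] at h; simp at h
    · rw [if_neg hc] at h
      exact ih f r h

-- ===== VERDICT (by name: the statement is the Claim_ definition above) =====
theorem solve_spec : Claim_equal_solve := by
  intro find n study _
  unfold Spec_solve solve solve_alt
  have hcounter : ∀ c, (find.toList.foldl (fun d c => d.insert c (d.getD c 0 + 1)) PySem.Dict.empty).getD c 0
      = ((find.toList.drop 0).count c : Int) := by
    intro c
    rw [PySem.Dict.foldl_insert_getD_add_one_eq_counter, PySem.Dict.getD_counter]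
    simp
  rw [solveLoopB_eq study.toList find.toList _ 0 (Nat.zero_le _) hcounter]
  simp only [List.drop_zero]
  cases h : solveLoopA study.toList find.toList with
  | none => simp
  | some r =>
    simp only [Option.map_some]
    have hsuffix : r.length ≤ find.toList.length := solveLoopA_length_le _ _ _ h
    by_cases hz : r.length > 0
    · have hne : ¬ (find.toList.length - r.length = find.toList.length) := by omega
      simp only [hz, if_true]
      rw [if_neg hne]
    · have hr0 : r.length = 0 := by omega
      simp [hr0]
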